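-- pv_equiv track=rewrite | github.com/artus-analysis/Artus | HarryPlotter/python/analysis_modules/tgraphfromhistograms.py | _iter_skip_trailing
-- ===== SOURCE A (Python) =====
-- from collections import deque
--
-- def _iter_skip_trailing(iterable):
-- 	"""Iterator skipping trailing bins that are empty in all histograms"""
-- 	trail_buffer = deque()
-- 	for bin_contents in iterable:
-- 		# buffer any empty ranges for later yield if sequence resumes
-- 		if any(any(histo_content) for histo_content in bin_contents):
-- 			for elem in trail_buffer:
-- 				yield elem
-- 			yield bin_contents
-- 		else:
-- 			trail_buffer.append(bin_contents)
-- ===== SOURCE B (Python) =====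
-- def _iter_skip_trailing(iterable):
-- 	"""Iterator skipping trailing bins that are empty in all histograms"""
-- 	bins = list(iterable)
-- 	n = len(bins)
-- 	while n > 0 and not any(any(histo_content) for histo_content in bins[n - 1]):
-- 		n -= 1
-- 	yield from bins[:n]
-- ===== Notes on version B (the rewrite author's own statement) =====
-- stated objective: simpler
-- what changed: Replaces the streaming deque-buffer logic (which never clears the buffer) by a single backward scan for the last non-empty bin followed by emitting that prefix.
-- intended difference: On inputs where some all-empty bin is followed by at least two non-empty bins, A re-yields the buffered empty bins before every later non-empty bin (the deque is never cleared, duplicating bins), while B yields each bin at most once, up to the last non-empty one, which is what 'skip trailing empty bins' intends. — e.g. on _iter_skip_trailing([[[0]], [[1]], [[1]]]): A returns [[[0]], [[1]], [[0]], [[1]]], B returns [[[0]], [[1]], [[1]]]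
import Mathlib
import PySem

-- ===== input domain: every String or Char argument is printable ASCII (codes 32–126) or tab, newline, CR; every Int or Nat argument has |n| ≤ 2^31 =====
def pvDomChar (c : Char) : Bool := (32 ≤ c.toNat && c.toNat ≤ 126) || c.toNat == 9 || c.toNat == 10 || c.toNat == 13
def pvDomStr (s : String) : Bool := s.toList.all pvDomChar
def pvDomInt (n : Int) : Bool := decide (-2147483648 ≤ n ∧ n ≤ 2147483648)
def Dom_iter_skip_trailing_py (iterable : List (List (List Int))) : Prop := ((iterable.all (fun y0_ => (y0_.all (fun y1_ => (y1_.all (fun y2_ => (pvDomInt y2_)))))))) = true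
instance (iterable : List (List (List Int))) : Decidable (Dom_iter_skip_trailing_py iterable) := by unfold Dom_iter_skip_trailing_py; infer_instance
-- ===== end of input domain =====

-- B drops the trailing all-empty bins by one backward boundary scan instead of A's streaming
-- deque buffer (which A never clears, so A duplicates buffered empty bins — see D_ below).
-- Both Pythons are generators; equivalence is about the yielded sequence as a list.

-- `any(any(histo_content) for histo_content in bin_contents)` — the emptiness test both sources share
def pvP (bc : List (List Int)) : Bool := bc.any (fun h => h.any (fun x => x != 0))

-- ===== PORT A =====
def iter_skip_trailing_py (iterable : List (List (List Int))) : List (List (List Int)) :=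
  -- state = (trail_buffer, yielded so far); the deque is never cleared, exactly as in A
  (iterable.foldl
    (fun (st : List (List (List Int)) × List (List (List Int))) bc =>
      if pvP bc then (st.1, st.2 ++ st.1 ++ [bc])
      else (st.1 ++ [bc], st.2))
    ([], [])).2

-- ===== PORT B =====
-- the `while n > 0 and not any(...bins[n-1]...): n -= 1` loop; bins[n-1] is in range whenever read
def pvFindCut (xs : List (List (List Int))) : Nat → Nat
  | 0 => 0
  | n + 1 => if pvP (xs.getD n []) then n + 1 else pvFindCut xs n

def iter_skip_trailing_py_alt (iterable : List (List (List Int))) : List (List (List Int)) :=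
  PySem.List.slice iterable none (some ((pvFindCut iterable iterable.length : Nat) : Int))

-- ===== PRECONDITION & SPEC =====
-- On inputs where some all-empty bin is followed by at least two non-empty bins, A re-yields its
-- never-cleared buffer before every later non-empty bin (duplicating bins), while B yields each
-- bin at most once up to the last non-empty one — the intended "skip trailing empty bins".
def pvDb : List (List (List Int)) → Bool
  | [] => false
  | x :: xs => (!pvP x && decide (2 ≤ xs.countP pvP)) || pvDb xs

def D_iter_skip_trailing_py (iterable : List (List (List Int))) : Prop := pvDb iterable = true
instance (iterable : List (List (List Int))) : Decidable (D_iter_skip_trailing_py iterable) := by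
  unfold D_iter_skip_trailing_py; infer_instance

def Spec_iter_skip_trailing_py (iterable : List (List (List Int))) (out : List (List (List Int))) : Prop :=
  ¬ D_iter_skip_trailing_py iterable → out = iter_skip_trailing_py_alt iterable
instance (iterable : List (List (List Int))) (out : List (List (List Int))) : Decidable (Spec_iter_skip_trailing_py iterable out) := by
  unfold Spec_iter_skip_trailing_py; infer_instance

def pvDiffWitness_iter_skip_trailing_py : List (List (List Int)) := [[[0]], [[1]], [[1]]]
def pvDiffWitnessOut_iter_skip_trailing_py : (List (List (List Int))) × (List (List (List Int))) :=
  ([[[0]], [[1]], [[0]], [[1]]], [[[0]], [[1]], [[1]]])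

-- ===== CLAIM (what is proved, stated in full; the proofs are below) =====
def Claim_unchanged_iter_skip_trailing_py : Prop := ∀ (iterable : List (List (List Int))), Dom_iter_skip_trailing_py iterable → Spec_iter_skip_trailing_py iterable (iter_skip_trailing_py iterable)
def Claim_changed_iter_skip_trailing_py : Prop := Dom_iter_skip_trailing_py (pvDiffWitness_iter_skip_trailing_py) ∧ D_iter_skip_trailing_py (pvDiffWitness_iter_skip_trailing_py) ∧ iter_skip_trailing_py (pvDiffWitness_iter_skip_trailing_py) = pvDiffWitnessOut_iter_skip_trailing_py.1 ∧ iter_skip_trailing_py_alt (pvDiffWitness_iter_skip_trailing_py) = pvDiffWitnessOut_iter_skip_trailing_py.2 ∧ pvDiffWitnessOut_iter_skip_trailing_py.1 ≠ pvDiffWitnessOut_iter_skip_trailing_py.2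
def Claim_exact_iter_skip_trailing_py : Prop := ∀ (iterable : List (List (List Int))), Dom_iter_skip_trailing_py iterable → D_iter_skip_trailing_py iterable → iter_skip_trailing_py iterable ≠ iter_skip_trailing_py_alt iterable

-- ===== LEMMAS AND PROOFS =====

-- A's loop, written as structural recursion: `goA buf xs` is what A still yields from `xs`
-- when the (never-cleared) buffer currently holds `buf`.
def goA (buf : List (List (List Int))) : List (List (List Int)) → List (List (List Int))
  | [] => []
  | x :: xs => if pvP x then buf ++ x :: goA buf xs else goA (buf ++ [x]) xs

-- the intended result: the prefix up to the last non-empty bin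
def goB : List (List (List Int)) → List (List (List Int))
  | [] => []
  | x :: xs => if xs.any pvP then x :: goB xs else if pvP x then [x] else []

theorem foldlA (xs : List (List (List Int))) : ∀ buf out,
    (xs.foldl
      (fun (st : List (List (List Int)) × List (List (List Int))) bc =>
        if pvP bc then (st.1, st.2 ++ st.1 ++ [bc])
        else (st.1 ++ [bc], st.2))
      (buf, out)).2 = out ++ goA buf xs := by
  induction xs with
  | nil => simp [goA]
  | cons x xs ih =>
    intro buf out
    by_cases h : pvP x = true
    · simp only [List.foldl_cons, if_pos h]
      rw [ih]; simp [goA, h]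
    · simp only [List.foldl_cons, if_neg h]
      rw [ih]; simp [goA, h]

theorem countP_pos_any (xs : List (List (List Int))) (h : 1 ≤ xs.countP pvP) :
    xs.any pvP = true := by
  rcases List.countP_pos_iff.mp (show 0 < xs.countP pvP by omega) with ⟨a, ha, hp⟩
  exact List.any_eq_true.mpr ⟨a, ha, hp⟩

theorem any_countP_pos (xs : List (List (List Int))) (h : xs.any pvP = true) :
    1 ≤ xs.countP pvP := by
  rcases List.any_eq_true.mp h with ⟨a, ha, hp⟩
  have := List.countP_pos_iff.mpr ⟨a, ha, hp⟩
  omega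

theorem no_any_of_countP_zero (xs : List (List (List Int))) (h : xs.countP pvP = 0) :
    xs.any pvP = false := by
  cases hca : xs.any pvP
  · rfl
  · have := any_countP_pos xs hca; omega

theorem goA_empty_count (xs : List (List (List Int))) :
    xs.countP pvP = 0 → ∀ buf, goA buf xs = [] := by
  induction xs with
  | nil => intro _ _; rfl
  | cons x xs ih =>
    intro h buf
    rw [List.countP_cons] at h
    by_cases hx : pvP x = true
    · rw [if_pos hx] at h; omega
    · rw [if_neg hx] at h
      rw [goA, if_neg hx]
      exact ih (by omega) _

theorem goA_one (xs : List (List (List Int))) :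
    xs.countP pvP = 1 → ∀ buf, goA buf xs = buf ++ goB xs := by
  induction xs with
  | nil => intro h; simp at h
  | cons x xs ih =>
    intro h buf
    rw [List.countP_cons] at h
    by_cases hx : pvP x = true
    · rw [if_pos hx] at h
      have h0 : xs.countP pvP = 0 := by omega
      rw [goA, if_pos hx, goB, no_any_of_countP_zero xs h0]
      simp [hx, goA_empty_count xs h0]
    · rw [if_neg hx] at h
      have h1 : xs.countP pvP = 1 := by omega
      have hany := countP_pos_any xs (by omega)
      rw [goA, if_neg hx, goB, hany]
      simp [ih h1, List.append_assoc]

theorem pvDb_count (xs : List (List (List Int))) :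
    pvDb xs = true → 2 ≤ xs.countP pvP := by
  induction xs with
  | nil => intro h; simp [pvDb] at h
  | cons x xs ih =>
    intro h
    rw [pvDb] at h
    rw [List.countP_cons]
    rcases Bool.or_eq_true_iff.mp h with h1 | h2
    · simp only [Bool.and_eq_true, decide_eq_true_eq] at h1
      have := h1.2
      split <;> omega
    · have := ih h2; split <;> omega

theorem goA_goB (xs : List (List (List Int))) :
    pvDb xs = false → goA [] xs = goB xs := by
  induction xs with
  | nil => intro _; rfl
  | cons x xs ih =>
    intro h
    rw [pvDb] at h
    rcases Bool.or_eq_false_iff.mp h with ⟨h1, h2⟩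
    by_cases hany : xs.any pvP = true
    · by_cases hx : pvP x = true
      · rw [goA, if_pos hx, goB, hany]
        simp [ih h2]
      · have hx' : pvP x = false := by simpa using hx
        have hle : xs.countP pvP ≤ 1 := by
          rw [hx'] at h1
          simp at h1
          omega
        have h1' : xs.countP pvP = 1 := le_antisymm hle (any_countP_pos xs hany)
        rw [goA, if_neg hx, goB, hany]
        simpa using goA_one xs h1' [x]
    · have hz : xs.countP pvP = 0 := by
        by_contra hc
        have := countP_pos_any xs (by omega)
        simp [this] at hany
      have hany' : xs.any pvP = false := by simpa using hany
      by_cases hx : pvP x = true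
      · rw [goA, if_pos hx, goB, hany']
        simp [hx, goA_empty_count xs hz]
      · rw [goA, if_neg hx, goB, hany']
        simp [hx, goA_empty_count xs hz]

-- ---- relating port B to goB ----

theorem findCut_stable (xs : List (List (List Int))) (x : List (List Int)) :
    ∀ n, n ≤ xs.length → pvFindCut (xs ++ [x]) n = pvFindCut xs n := by
  intro n
  induction n with
  | zero => intro _; rfl
  | succ n ih =>
    intro hn
    have hg : (xs ++ [x]).getD n [] = xs.getD n [] := by
      have : n < xs.length := by omega
      simp [List.getD, List.getElem?_append_left this]
    rw [pvFindCut, pvFindCut, hg, ih (by omega)]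

theorem findCut_le (xs : List (List (List Int))) : ∀ n, pvFindCut xs n ≤ n := by
  intro n
  induction n with
  | zero => simp [pvFindCut]
  | succ n ih =>
    rw [pvFindCut]
    split <;> omega

theorem goB_snoc (xs : List (List (List Int))) (x : List (List Int)) :
    goB (xs ++ [x]) = if pvP x then xs ++ [x] else goB xs := by
  induction xs with
  | nil => by_cases hx : pvP x = true <;> simp [goB, hx]
  | cons y ys ih =>
    by_cases hx : pvP x = true
    · simp [goB, hx, ih]
    · by_cases hany : ys.any pvP = true <;>
        simp [goB, hx, hany, ih]

theorem alt_eq_goB (xs : List (List (List Int))) :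
    iter_skip_trailing_py_alt xs = goB xs := by
  induction xs using List.reverseRecOn with
  | nil => rfl
  | append_singleton ys y ih =>
    rw [iter_skip_trailing_py_alt, PySem.List.slice_to_natCast, goB_snoc]
    have hlen : (ys ++ [y]).length = ys.length + 1 := by simp
    rw [hlen, pvFindCut]
    have hg : (ys ++ [y]).getD ys.length [] = y := by
      simp [List.getD]
    rw [hg]
    by_cases hy : pvP y = true
    · rw [if_pos hy, if_pos hy, ← hlen, List.take_length]
    · rw [if_neg hy, if_neg hy]
      rw [findCut_stable ys y ys.length le_rfl,
        List.take_append_of_le_length (findCut_le ys ys.length)]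
      rw [iter_skip_trailing_py_alt, PySem.List.slice_to_natCast] at ih
      exact ih

theorem portA_eq_goA (xs : List (List (List Int))) :
    iter_skip_trailing_py xs = goA [] xs := by
  rw [iter_skip_trailing_py]
  simpa using foldlA xs [] []

-- ---- length lemmas for tightness ----

theorem goA_len (xs : List (List (List Int))) : ∀ buf,
    (goA buf xs).length = (goA [] xs).length + buf.length * xs.countP pvP := by
  induction xs with
  | nil => simp [goA]
  | cons x xs ih =>
    intro buf
    by_cases hx : pvP x = true
    · rw [goA, goA, if_pos hx, if_pos hx, List.countP_cons, if_pos hx]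
      simp [ih buf]
      ring
    · rw [goA, goA, if_neg hx, if_neg hx, List.countP_cons, if_neg hx]
      rw [ih (buf ++ [x]), ih ([] ++ [x])]
      simp
      ring

theorem lenB_cons_any (x : List (List Int)) (xs : List (List (List Int)))
    (h : xs.any pvP = true) : (goB (x :: xs)).length = 1 + (goB xs).length := by
  rw [goB, h]; simp; omega

theorem goA_gt_goB (xs : List (List (List Int))) :
    pvDb xs = true → (goB xs).length < (goA [] xs).length := by
  induction xs with
  | nil => intro h; simp [pvDb] at h
  | cons x xs ih =>
    intro h
    have hc2 : 2 ≤ (x :: xs).countP pvP := pvDb_count _ h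
    rw [pvDb] at h
    by_cases hx : pvP x = true
    · have hd : pvDb xs = true := by
        rcases Bool.or_eq_true_iff.mp h with h1 | h2
        · rw [hx] at h1; simp at h1
        · exact h2
      have hany : xs.any pvP = true :=
        countP_pos_any xs (by have := pvDb_count xs hd; omega)
      rw [lenB_cons_any x xs hany, goA, if_pos hx]
      have := ih hd
      simp; omega
    · have hcnt : 2 ≤ xs.countP pvP := by
        rw [List.countP_cons, if_neg hx] at hc2; omega
      have hany : xs.any pvP = true := countP_pos_any xs (by omega)
      rw [lenB_cons_any x xs hany, goA, if_neg hx]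
      rw [goA_len xs ([] ++ [x])]
      simp only [List.nil_append, List.length_singleton, one_mul]
      by_cases hd : pvDb xs = true
      · have := ih hd; omega
      · have heq : goA [] xs = goB xs := goA_goB xs (by simpa using hd)
        rw [heq]; omega

-- ===== VERDICT (by name: the statement is the Claim_ definition above) =====
theorem iter_skip_trailing_py_spec : Claim_unchanged_iter_skip_trailing_py := by
  intro xs _ hnd
  have hdb : pvDb xs = false := by
    by_contra hc
    exact hnd (by simpa [D_iter_skip_trailing_py] using hc)
  rw [portA_eq_goA, alt_eq_goB, goA_goB xs hdb]

theorem iter_skip_trailing_py_changed : Claim_changed_iter_skip_trailing_py := by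
  unfold Claim_changed_iter_skip_trailing_py; decide

theorem iter_skip_trailing_py_tight : Claim_exact_iter_skip_trailing_py := by
  intro xs _ hd heq
  have := goA_gt_goB xs hd
  rw [portA_eq_goA, alt_eq_goB] at heq
  have hl := congrArg List.length heq
  omega
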